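-- pv_equiv track=rewrite | github.com/przemyslaw-pawelczak/inUnity | sceptic/ScEpTIC/tools.py | split_context_into_sublist
-- ===== SOURCE A (Python) =====
-- def split_context_into_sublist(lst, separator, start_tokens = ['(', '[', '{', '<'], end_tokens = [')', ']', '}', '>']):
--     """
--     Split the list into sublists.
--     Elements between start_token and end_token are not splitted.
--     e.g. split_context_into_sublist(, ',', ['{'], ['}'])
--     ['line', ':', '18', ',', 'test', ':', '!', '{', '!', '3', ',', '!', '5', ',', '!', '6', '}']
--     returns
--     [['line', ':', '18'], ['test', ':', '!', '{', '!', '3', ',', '!', '5', ',', '!', '6', '}']]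
--     """
--
--     new_list = []
--     sub_list = []
--
--     opened_tokens = []
--
--     for i in range(0, len(start_tokens)):
--         opened_tokens.append(0)
--
--     for i in range(0, len(lst)):
--         element = lst[i]
--
--         # increment / decrement opened tokens
--         if element in start_tokens:
--             index = start_tokens.index(element)
--             opened_tokens[index] += 1
--         elif element in end_tokens:
--             index = end_tokens.index(element)
--             opened_tokens[index] -= 1
--
--         # if not separator or inside start_token ... end_token, do not split
--         # otherwise close the sublist and create next ones.
--         if sum(opened_tokens) > 0 or element != separator:
--             sub_list.append(element)
--         else:
--             new_list.append(sub_list)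
--             sub_list = []
--
--     if len(sub_list) > 0:
--         new_list.append(sub_list)
--
--     return new_list
-- ===== SOURCE B (Python) =====
-- def split_context_into_sublist(lst, separator, start_tokens = ['(', '[', '{', '<'], end_tokens = [')', ']', '}', '>']):
--     """Staged re-implementation: (1) one pass computing the running nesting depth
--     after each element, (2) collect the indices of separators occurring at
--     non-positive depth, (3) build the result by slicing lst at those indices."""
--     starts = set(start_tokens)
--     ends = set(end_tokens)
--     depths = []
--     d = 0
--     for e in lst:
--         if e in starts:
--             d += 1
--         elif e in ends:
--             d -= 1
--         depths.append(d)
--     cuts = [i for i, e in enumerate(lst) if e == separator and depths[i] <= 0]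
--     result = []
--     prev = 0
--     for c in cuts:
--         result.append(lst[prev:c])
--         prev = c + 1
--     if prev < len(lst):
--         result.append(lst[prev:])
--     return result
-- ===== Notes on version B (the rewrite author's own statement) =====
-- stated objective: faster
-- what changed: B replaces A's single accumulator pass (per-token counter list rebuilt via list.index and re-summed with sum() at every element) by a staged pipeline: one pass computing the running nesting depth per position, a comprehension collecting the cut indices, then building the result by slicing the input at those indices.
-- crash fix: On lists containing an element that is in end_tokens (and not in start_tokens) at an index >= len(start_tokens), A raises IndexError (opened_tokens has only len(start_tokens) slots); B returns the ordinary split. — e.g. on split_context_into_sublist(["x"], ",", [], ["x"]): A raises IndexError, B returns [["x"]]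
import Mathlib
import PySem

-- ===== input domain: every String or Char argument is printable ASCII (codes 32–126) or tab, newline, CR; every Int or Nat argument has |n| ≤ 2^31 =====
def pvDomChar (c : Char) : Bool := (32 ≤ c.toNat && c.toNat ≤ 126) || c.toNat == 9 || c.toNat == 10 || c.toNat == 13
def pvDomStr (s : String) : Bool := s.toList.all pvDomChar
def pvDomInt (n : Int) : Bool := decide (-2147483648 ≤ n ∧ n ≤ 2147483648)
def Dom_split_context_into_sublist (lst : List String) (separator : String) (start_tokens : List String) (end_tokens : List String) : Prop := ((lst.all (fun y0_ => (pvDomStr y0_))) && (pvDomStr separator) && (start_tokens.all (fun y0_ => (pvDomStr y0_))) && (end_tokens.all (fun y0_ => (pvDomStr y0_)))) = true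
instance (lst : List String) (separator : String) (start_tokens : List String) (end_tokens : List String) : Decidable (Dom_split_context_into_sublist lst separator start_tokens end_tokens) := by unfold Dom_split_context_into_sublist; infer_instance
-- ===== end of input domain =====

-- B rebuilds the result in three stages — running depth per position, the list of cut indices,
-- then slicing the input at those indices — instead of A's single accumulator pass (objective: faster).

-- ===== PORT A =====
-- loop body of A's main 'for i in range(0, len(lst))' loop (element = lst[i]); state = (new_list, sub_list, opened_tokens)
def pvAStep (separator : String) (start_tokens end_tokens : List String)
    (st : List (List String) × List String × List Int) (element : String) :
    List (List String) × List String × List Int :=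
  let opened :=
    if element ∈ start_tokens then
      match PySem.List.index? start_tokens element with
      | some idx => PySem.List.pySetD st.2.2 (idx : Int) (PySem.List.pyGetD st.2.2 (idx : Int) 0 + 1)
      | none => st.2.2
    else if element ∈ end_tokens then
      match PySem.List.index? end_tokens element with
      | some idx => PySem.List.pySetD st.2.2 (idx : Int) (PySem.List.pyGetD st.2.2 (idx : Int) 0 - 1)
      | none => st.2.2
    else st.2.2
  if opened.sum > 0 ∨ element ≠ separator then (st.1, st.2.1 ++ [element], opened)
  else (st.1 ++ [st.2.1], ([] : List String), opened)

def split_context_into_sublist (lst : List String) (separator : String) (start_tokens : List String) (end_tokens : List String) : List (List String) :=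
  -- 'for i in range(0, len(start_tokens)): opened_tokens.append(0)'
  let opened0 := (PySem.List.pyRange 0 (start_tokens.length : Int) 1).foldl (fun a _ => a ++ [(0 : Int)]) []
  let s := lst.foldl (pvAStep separator start_tokens end_tokens) ([], [], opened0)
  if s.2.1.length > 0 then s.1 ++ [s.2.1] else s.1

-- ===== PORT B =====
def split_context_into_sublist_alt (lst : List String) (separator : String) (start_tokens : List String) (end_tokens : List String) : List (List String) :=
  let starts := PySem.Set.ofList start_tokens
  let ends := PySem.Set.ofList end_tokens
  -- stage 1: running nesting depth after each element
  let dp := lst.foldl (fun (st : List Int × Int) e =>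
      let d := if PySem.Set.contains starts e then st.2 + 1
               else if PySem.Set.contains ends e then st.2 - 1 else st.2
      (st.1 ++ [d], d)) ([], 0)
  let depths := dp.1
  -- stage 2: indices of separators at non-positive depth
  let cuts := ((PySem.List.enumerate lst 0).filter
      (fun p => p.2 == separator && decide (PySem.List.pyGetD depths p.1 0 ≤ 0))).map (·.1)
  -- stage 3: slice lst at the cut indices
  let rp := cuts.foldl (fun (st : List (List String) × Int) c =>
      (st.1 ++ [PySem.List.slice lst (some st.2) (some c)], c + 1)) ([], 0)
  if rp.2 < (lst.length : Int) then rp.1 ++ [PySem.List.slice lst (some rp.2) none] else rp.1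

-- ===== PRECONDITION & SPEC =====
-- Pre_ excludes exactly the inputs on which A raises IndexError: an element of lst that is not a
-- start token but is an end token whose first position in end_tokens is ≥ len(start_tokens)
-- (opened_tokens has only len(start_tokens) slots).
def Pre_split_context_into_sublist (lst : List String) (separator : String) (start_tokens : List String) (end_tokens : List String) : Prop :=
  ∀ e ∈ lst, e ∉ start_tokens → e ∈ end_tokens →
    (PySem.List.index? end_tokens e).getD 0 < start_tokens.length
instance (lst : List String) (separator : String) (start_tokens : List String) (end_tokens : List String) : Decidable (Pre_split_context_into_sublist lst separator start_tokens end_tokens) := by unfold Pre_split_context_into_sublist; infer_instance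

def pvWitness_split_context_into_sublist : List String × String × List String × List String :=
  (["line", ":", "18", ",", "test", ":", "{", "3", ",", "5", "}"], ",", ["{"], ["}"])

-- A raises IndexError on inputs where some element of lst lies in end_tokens (and not in
-- start_tokens) at an index ≥ len(start_tokens); B returns the ordinary split there.
def Raises_split_context_into_sublist (lst : List String) (separator : String) (start_tokens : List String) (end_tokens : List String) : Prop :=
  ∃ e ∈ lst, e ∉ start_tokens ∧ e ∈ end_tokens ∧
    start_tokens.length ≤ (PySem.List.index? end_tokens e).getD 0
instance (lst : List String) (separator : String) (start_tokens : List String) (end_tokens : List String) : Decidable (Raises_split_context_into_sublist lst separator start_tokens end_tokens) := by unfold Raises_split_context_into_sublist; infer_instance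
def pvRaiseWitness_split_context_into_sublist : List String × String × List String × List String :=
  (["x"], ",", [], ["x"])
def pvRaiseWitnessOut_split_context_into_sublist : List (List String) := [["x"]]

def Spec_split_context_into_sublist (lst : List String) (separator : String) (start_tokens : List String) (end_tokens : List String) (out : List (List String)) : Prop := out = split_context_into_sublist_alt lst separator start_tokens end_tokens
instance (lst : List String) (separator : String) (start_tokens : List String) (end_tokens : List String) (out : List (List String)) : Decidable (Spec_split_context_into_sublist lst separator start_tokens end_tokens out) := by unfold Spec_split_context_into_sublist; infer_instance

-- ===== CLAIM (what is proved, stated in full; the proofs are below) =====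
def Claim_equal_split_context_into_sublist : Prop := ∀ (lst : List String) (separator : String) (start_tokens : List String) (end_tokens : List String), Dom_split_context_into_sublist lst separator start_tokens end_tokens → Pre_split_context_into_sublist lst separator start_tokens end_tokens → Spec_split_context_into_sublist lst separator start_tokens end_tokens (split_context_into_sublist lst separator start_tokens end_tokens)

def Claim_raises_split_context_into_sublist : Prop := (∀ (lst : List String) (separator : String) (start_tokens : List String) (end_tokens : List String), Dom_split_context_into_sublist lst separator start_tokens end_tokens → Raises_split_context_into_sublist lst separator start_tokens end_tokens → ¬ Pre_split_context_into_sublist lst separator start_tokens end_tokens) ∧ (Dom_split_context_into_sublist (pvRaiseWitness_split_context_into_sublist.1) (pvRaiseWitness_split_context_into_sublist.2.1) (pvRaiseWitness_split_context_into_sublist.2.2.1) (pvRaiseWitness_split_context_into_sublist.2.2.2) ∧ Raises_split_context_into_sublist (pvRaiseWitness_split_context_into_sublist.1) (pvRaiseWitness_split_context_into_sublist.2.1) (pvRaiseWitness_split_context_into_sublist.2.2.1) (pvRaiseWitness_split_context_into_sublist.2.2.2) ∧ split_context_into_sublist_alt (pvRaiseWitness_split_context_into_sublist.1) (pvRaiseWitness_split_context_into_sublist.2.1)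 (pvRaiseWitness_split_context_into_sublist.2.2.1) (pvRaiseWitness_split_context_into_sublist.2.2.2) = pvRaiseWitnessOut_split_context_into_sublist)

-- ===== LEMMAS AND PROOFS =====

-- the common depth update: A's sum-of-counters delta = B's single-depth delta
def pvUpd (sts ens : List String) (d : Int) (e : String) : Int :=
  if e ∈ sts then d + 1 else if e ∈ ens then d - 1 else d

-- reference recursion: the split as a structural recursion on the list
def pvH (sep : String) (sts ens : List String) (cur : List String) (d : Int) : List String → List (List String)
  | [] => if cur.length > 0 then [cur] else []
  | e :: rest =>
    if pvUpd sts ens d e > 0 ∨ e ≠ sep then pvH sep sts ens (cur ++ [e]) (pvUpd sts ens d e) rest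
    else cur :: pvH sep sts ens [] (pvUpd sts ens d e) rest

-- single-pass intermediate (A-shaped state, B-shaped depth)
def pvSPStep (sep : String) (sts ens : List String)
    (st : List (List String) × List String × Int) (e : String) : List (List String) × List String × Int :=
  let d := pvUpd sts ens st.2.2 e
  if d > 0 ∨ e ≠ sep then (st.1, st.2.1 ++ [e], d)
  else (st.1 ++ [st.2.1], ([] : List String), d)

-- B's three stages, recursively characterised
def pvDepths (sts ens : List String) (d : Int) : List String → List Int
  | [] => []
  | e :: rest => pvUpd sts ens d e :: pvDepths sts ens (pvUpd sts ens d e) rest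

def pvCuts (sep : String) (sts ens : List String) (d : Int) : List String → List Int
  | [] => []
  | e :: rest =>
    (if e = sep ∧ pvUpd sts ens d e ≤ 0 then [(0 : Int)] else [])
      ++ (pvCuts sep sts ens (pvUpd sts ens d e) rest).map (· + 1)

def pvDStep (starts ends : PySem.Set String) (st : List Int × Int) (e : String) : List Int × Int :=
  let d := if PySem.Set.contains starts e then st.2 + 1
           else if PySem.Set.contains ends e then st.2 - 1 else st.2
  (st.1 ++ [d], d)

def pvSStep (lst : List String) (st : List (List String) × Int) (c : Int) : List (List String) × Int :=
  (st.1 ++ [PySem.List.slice lst (some st.2) (some c)], c + 1)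

def pvSFin (lst : List String) (cs : List Int) : List (List String) :=
  let rp := cs.foldl (pvSStep lst) ([], 0)
  if rp.2 < (lst.length : Int) then rp.1 ++ [PySem.List.slice lst (some rp.2) none] else rp.1

def pvConsFirst (cur : List String) : List (List String) → List (List String)
  | [] => if cur.length > 0 then [cur] else []
  | p :: ps => (cur ++ p) :: ps

-- opened_tokens = [0] * len(start_tokens)
theorem pvFoldAppendZero (l : List Int) (acc : List Int) :
    l.foldl (fun a _ => a ++ [(0 : Int)]) acc = acc ++ List.replicate l.length 0 := by
  induction l generalizing acc with
  | nil => simp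
  | cons x xs ih =>
    rw [List.foldl_cons, ih]
    simp [List.replicate_succ, List.append_assoc]

-- sum after an in-range bump by δ
theorem pvSumSet (l : List Int) (n : Nat) (δ : Int) (h : n < l.length) :
    (l.set n (l[n]?.getD 0 + δ)).sum = l.sum + δ := by
  induction l generalizing n with
  | nil => simp at h
  | cons x xs ih =>
    cases n with
    | zero => simp [List.sum_cons]; ring
    | succ m =>
      simp only [List.set_cons_succ, List.getElem?_cons_succ, List.sum_cons]
      rw [ih m (by simpa using h)]
      ring

theorem pvStepAgree (separator : String) (start_tokens end_tokens : List String)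
    (element : String) (nl : List (List String)) (sl : List String) (op : List Int) (d : Int)
    (hsum : op.sum = d) (hlen : op.length = start_tokens.length)
    (hpre : element ∉ start_tokens → element ∈ end_tokens →
      (PySem.List.index? end_tokens element).getD 0 < start_tokens.length) :
    (pvAStep separator start_tokens end_tokens (nl, sl, op) element).1
      = (pvSPStep separator start_tokens end_tokens (nl, sl, d) element).1 ∧
    (pvAStep separator start_tokens end_tokens (nl, sl, op) element).2.1
      = (pvSPStep separator start_tokens end_tokens (nl, sl, d) element).2.1 ∧
    (pvAStep separator start_tokens end_tokens (nl, sl, op) element).2.2.sum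
      = (pvSPStep separator start_tokens end_tokens (nl, sl, d) element).2.2 ∧
    (pvAStep separator start_tokens end_tokens (nl, sl, op) element).2.2.length = start_tokens.length := by
  by_cases hs : element ∈ start_tokens
  · rcases heq : PySem.List.index? start_tokens element with _ | k
    · exact absurd ((PySem.List.index?_eq_none_iff _ _).1 heq) (by simpa using hs)
    · obtain ⟨hklt, -⟩ := PySem.List.getElem_of_index?_eq_some heq
      have hsum' : (op.set k (op[k]?.getD 0 + 1)).sum = d + 1 := by
        rw [pvSumSet op k 1 (by omega)]; omega
      simp only [pvAStep, pvSPStep, pvUpd, heq, if_pos hs,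
        PySem.List.pySetD_natCast, PySem.List.pyGetD_natCast, List.getD_eq_getElem?_getD, hsum']
      split_ifs <;> simp [hsum', hlen]
  · by_cases he : element ∈ end_tokens
    · rcases heq : PySem.List.index? end_tokens element with _ | k
      · exact absurd ((PySem.List.index?_eq_none_iff _ _).1 heq) (by simpa using he)
      · have hklt : k < op.length := by
          have := hpre hs he; rw [heq] at this; simpa [hlen] using this
        have hsum' : (op.set k (op[k]?.getD 0 - 1)).sum = d - 1 := by
          have h2 := pvSumSet op k (-1) hklt
          rw [hsum] at h2
          simpa [sub_eq_add_neg] using h2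
        simp only [pvAStep, pvSPStep, pvUpd, heq, if_neg hs, if_pos he,
          PySem.List.pySetD_natCast, PySem.List.pyGetD_natCast, List.getD_eq_getElem?_getD, hsum']
        split_ifs <;> simp [hsum', hlen]
    · simp only [pvAStep, pvSPStep, pvUpd, if_neg hs, if_neg he, hsum]
      split_ifs <;> simp [hsum, hlen]

theorem pvFoldAgree (separator : String) (start_tokens end_tokens : List String)
    (l : List String)
    (hpre : ∀ e ∈ l, e ∉ start_tokens → e ∈ end_tokens →
      (PySem.List.index? end_tokens e).getD 0 < start_tokens.length) :
    ∀ (nl : List (List String)) (sl : List String) (op : List Int) (d : Int),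
      op.sum = d → op.length = start_tokens.length →
      (l.foldl (pvAStep separator start_tokens end_tokens) (nl, sl, op)).1
        = (l.foldl (pvSPStep separator start_tokens end_tokens) (nl, sl, d)).1 ∧
      (l.foldl (pvAStep separator start_tokens end_tokens) (nl, sl, op)).2.1
        = (l.foldl (pvSPStep separator start_tokens end_tokens) (nl, sl, d)).2.1 := by
  induction l with
  | nil => intro nl sl op d h1 h2; exact ⟨rfl, rfl⟩
  | cons x xs ih =>
    intro nl sl op d hsum hlen
    obtain ⟨h1, h2, h3, h4⟩ := pvStepAgree separator start_tokens end_tokens x nl sl op d hsum hlen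
      (hpre x (List.mem_cons_self))
    have hpre' : ∀ e ∈ xs, e ∉ start_tokens → e ∈ end_tokens →
        (PySem.List.index? end_tokens e).getD 0 < start_tokens.length :=
      fun e he => hpre e (List.mem_cons_of_mem _ he)
    simp only [List.foldl_cons]
    have hB : pvSPStep separator start_tokens end_tokens (nl, sl, d) x
        = ((pvAStep separator start_tokens end_tokens (nl, sl, op) x).1,
           (pvAStep separator start_tokens end_tokens (nl, sl, op) x).2.1,
           (pvSPStep separator start_tokens end_tokens (nl, sl, d) x).2.2) := by
      rw [h1, h2]
    rw [hB]
    exact ih hpre' _ _ _ _ h3 h4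

-- single pass + final flush = the reference recursion pvH
theorem pvSPtoH (sep : String) (sts ens : List String) :
    ∀ (l : List String) (done : List (List String)) (cur : List String) (d : Int),
      (if (l.foldl (pvSPStep sep sts ens) (done, cur, d)).2.1.length > 0
        then (l.foldl (pvSPStep sep sts ens) (done, cur, d)).1
          ++ [(l.foldl (pvSPStep sep sts ens) (done, cur, d)).2.1]
        else (l.foldl (pvSPStep sep sts ens) (done, cur, d)).1)
      = done ++ pvH sep sts ens cur d l := by
  intro l
  induction l with
  | nil =>
    intro done cur d
    simp only [List.foldl_nil, pvH]
    split_ifs <;> simp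
  | cons e r ih =>
    intro done cur d
    simp only [List.foldl_cons, pvSPStep, pvH]
    by_cases hc : pvUpd sts ens d e > 0 ∨ e ≠ sep
    · simp only [if_pos hc]
      exact ih done (cur ++ [e]) (pvUpd sts ens d e)
    · simp only [if_neg hc]
      rw [ih (done ++ [cur]) [] (pvUpd sts ens d e)]
      simp
  
-- stage 1 characterisation
theorem pvDFold (sts ens : List String) (l : List String) :
    ∀ (acc : List Int) (d : Int),
      (l.foldl (pvDStep (PySem.Set.ofList sts) (PySem.Set.ofList ens)) (acc, d)).1
        = acc ++ pvDepths sts ens d l := by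
  induction l with
  | nil => intro acc d; simp [pvDepths]
  | cons e r ih =>
    intro acc d
    have hstep : pvDStep (PySem.Set.ofList sts) (PySem.Set.ofList ens) (acc, d) e
        = (acc ++ [pvUpd sts ens d e], pvUpd sts ens d e) := by
      simp [pvDStep, pvUpd, PySem.Set.mem_ofList]
    simp only [List.foldl_cons, hstep, ih, pvDepths, List.append_assoc, List.singleton_append]

-- index shift of enumerate
theorem pvEnumShift {α : Type} (xs : List α) (s : Int) :
    PySem.List.enumerate xs (s + 1) = (PySem.List.enumerate xs s).map (fun p => (p.1 + 1, p.2)) := by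
  induction xs generalizing s with
  | nil => simp [PySem.List.enumerate_nil]
  | cons x xs ih => simp [PySem.List.enumerate_cons, ih]

-- stage 2 characterisation
theorem pvCutsEq (sep : String) (sts ens : List String) (l : List String) :
    ∀ (d : Int),
      (((PySem.List.enumerate l 0).filter
          (fun p => p.2 == sep && decide (PySem.List.pyGetD (pvDepths sts ens d l) p.1 0 ≤ 0))).map (·.1))
        = pvCuts sep sts ens d l := by
  induction l with
  | nil => intro d; simp [pvCuts, PySem.List.enumerate_nil]
  | cons e r ih =>
    intro d
    show (((PySem.List.enumerate (e :: r) 0).filter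
        (fun p => p.2 == sep && decide (PySem.List.pyGetD
          (pvUpd sts ens d e :: pvDepths sts ens (pvUpd sts ens d e) r) p.1 0 ≤ 0))).map (·.1))
      = (if e = sep ∧ pvUpd sts ens d e ≤ 0 then [(0 : Int)] else [])
          ++ (pvCuts sep sts ens (pvUpd sts ens d e) r).map (· + 1)
    rw [PySem.List.enumerate_cons, show (0 : Int) + 1 = 0 + 1 from rfl, pvEnumShift,
      List.filter_cons]
    have hshift : ((PySem.List.enumerate r 0).map (fun p => (p.1 + 1, p.2))).filter
          (fun p => p.2 == sep && decide (PySem.List.pyGetD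
            (pvUpd sts ens d e :: pvDepths sts ens (pvUpd sts ens d e) r) p.1 0 ≤ 0))
        = ((PySem.List.enumerate r 0).filter
            (fun p => p.2 == sep && decide (PySem.List.pyGetD
              (pvDepths sts ens (pvUpd sts ens d e) r) p.1 0 ≤ 0))).map (fun p => (p.1 + 1, p.2)) := by
      rw [List.filter_map]
      congr 1
      apply List.filter_congr
      intro p hp
      obtain ⟨k, hk, rfl⟩ := (PySem.List.mem_enumerate_iff _ _ _).1 hp
      have h1 : PySem.List.pyGetD
            (pvUpd sts ens d e :: pvDepths sts ens (pvUpd sts ens d e) r) ((k : Int) + 1) 0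
          = (pvDepths sts ens (pvUpd sts ens d e) r)[k]?.getD 0 := by
        have e1 : ((k : Int) + 1) = ((k + 1 : Nat) : Int) := by push_cast; ring
        rw [e1, PySem.List.pyGetD_natCast]
        simp
      simp [Function.comp, h1]
    by_cases hcut : e = sep ∧ pvUpd sts ens d e ≤ 0
    · obtain ⟨rfl, hd2⟩ := hcut
      have hb : ((e == e) && decide (PySem.List.pyGetD
          (pvUpd sts ens d e :: pvDepths sts ens (pvUpd sts ens d e) r) (0 : Int) 0 ≤ 0)) = true := by
        simp [PySem.List.pyGetD_zero_cons, hd2]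
      rw [if_pos (And.intro rfl hd2), if_pos hb, List.map_cons, hshift, List.map_map,
        ← ih (pvUpd sts ens d e), List.map_map]
      simp [Function.comp]
    · have hb : ((e == sep) && decide (PySem.List.pyGetD
          (pvUpd sts ens d e :: pvDepths sts ens (pvUpd sts ens d e) r) (0 : Int) 0 ≤ 0)) = false := by
        rcases not_and_or.1 hcut with h | h
        · simp [PySem.List.pyGetD_zero_cons]
          intro he; exact absurd he h
        · simp [PySem.List.pyGetD_zero_cons]
          intro _; omega
      have hnb : ¬ (((e == sep) && decide (PySem.List.pyGetD
          (pvUpd sts ens d e :: pvDepths sts ens (pvUpd sts ens d e) r) (0 : Int) 0 ≤ 0)) = true) := by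
        rw [hb]; simp
      rw [if_neg hcut, if_neg hnb, hshift, List.map_map,
        ← ih (pvUpd sts ens d e), List.map_map]
      simp [Function.comp]

-- cut indices are nonnegative
theorem pvCutsNonneg (sep : String) (sts ens : List String) :
    ∀ (l : List String) (d : Int), ∀ c ∈ pvCuts sep sts ens d l, 0 ≤ c := by
  intro l
  induction l with
  | nil => intro d c hc; simp [pvCuts] at hc
  | cons e r ih =>
    intro d c hc
    simp only [pvCuts, List.mem_append] at hc
    rcases hc with hc | hc
    · split_ifs at hc <;> simp_all
    · obtain ⟨x, hx, rfl⟩ := List.mem_map.1 hc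
      have := ih _ x hx
      omega

-- slice helper lemmas
theorem pvSliceCons0 (e : String) (r : List String) (c : Int) (hc : 0 ≤ c) :
    PySem.List.slice (e :: r) (some 0) (some (c + 1)) = e :: PySem.List.slice r (some 0) (some c) := by
  rw [PySem.List.slice_toNat _ le_rfl (by omega), PySem.List.slice_toNat _ le_rfl hc]
  have h1 : (c + 1).toNat = c.toNat + 1 := by omega
  simp [h1, List.take_succ_cons]

theorem pvSliceShift (e : String) (r : List String) (p c : Int) (hp : 0 ≤ p) (hc : 0 ≤ c) :
    PySem.List.slice (e :: r) (some (p + 1)) (some (c + 1)) = PySem.List.slice r (some p) (some c) := by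
  rw [PySem.List.slice_toNat _ (by omega) (by omega), PySem.List.slice_toNat _ hp hc]
  have h1 : (p + 1).toNat = p.toNat + 1 := by omega
  have h2 : (c + 1).toNat = c.toNat + 1 := by omega
  simp [h1, h2]

theorem pvSliceFromShift (e : String) (r : List String) (p : Int) (hp : 0 ≤ p) :
    PySem.List.slice (e :: r) (some (p + 1)) none = PySem.List.slice r (some p) none := by
  rw [PySem.List.slice_from _ (by omega), PySem.List.slice_from _ hp]
  have h1 : (p + 1).toNat = p.toNat + 1 := by omega
  simp [h1]

-- slice-fold bookkeeping
theorem pvSAcc (lst : List String) (cs : List Int) :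
    ∀ (res res' : List (List String)) (p : Int),
      cs.foldl (pvSStep lst) (res ++ res', p)
        = (res ++ (cs.foldl (pvSStep lst) (res', p)).1, (cs.foldl (pvSStep lst) (res', p)).2) := by
  induction cs with
  | nil => intro res res' p; simp
  | cons c cs ih =>
    intro res res' p
    simp only [List.foldl_cons, pvSStep, List.append_assoc]
    exact ih res _ _

theorem pvSSnd (lst : List String) (cs : List Int) :
    ∀ (res : List (List String)) (p : Int), 0 ≤ p → (∀ c ∈ cs, 0 ≤ c) →
      0 ≤ (cs.foldl (pvSStep lst) (res, p)).2 := by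
  induction cs with
  | nil => intro res p hp _; simpa using hp
  | cons c cs ih =>
    intro res p hp hcs
    simp only [List.foldl_cons, pvSStep]
    exact ih _ (c + 1) (by have := hcs c (by simp); omega) (fun x hx => hcs x (by simp [hx]))

theorem pvSShift (e : String) (r : List String) (cs : List Int) :
    ∀ (res : List (List String)) (p : Int), 0 ≤ p → (∀ c ∈ cs, 0 ≤ c) →
      (cs.map (· + 1)).foldl (pvSStep (e :: r)) (res, p + 1)
        = ((cs.foldl (pvSStep r) (res, p)).1, (cs.foldl (pvSStep r) (res, p)).2 + 1) := by
  induction cs with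
  | nil => intro res p hp _; simp
  | cons c cs ih =>
    intro res p hp hcs
    have hc : 0 ≤ c := hcs c (by simp)
    simp only [List.map_cons, List.foldl_cons, pvSStep]
    rw [pvSliceShift e r p c hp hc]
    exact ih _ (c + 1) (by omega) (fun x hx => hcs x (by simp [hx]))

-- stage 3 recursion: shifting all cuts off a head element
theorem pvSFinShift (e : String) (r : List String) (cs : List Int) (h : ∀ c ∈ cs, 0 ≤ c) :
    pvSFin (e :: r) (cs.map (· + 1)) = pvConsFirst [e] (pvSFin r cs) := by
  cases cs with
  | nil =>
    cases r with
    | nil => simp [pvSFin, pvConsFirst]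
    | cons y ys =>
      simp [pvSFin, pvConsFirst, PySem.List.slice_from _ le_rfl]
      omega
  | cons c cs' =>
    have hc : 0 ≤ c := h c (by simp)
    have hcs' : ∀ x ∈ cs', 0 ≤ x := fun x hx => h x (by simp [hx])
    unfold pvSFin
    simp only [List.map_cons, List.foldl_cons, pvSStep, List.nil_append]
    rw [pvSliceCons0 e r c hc, pvSShift e r cs' _ (c + 1) (by omega) hcs']
    have hacc1 : cs'.foldl (pvSStep r) ([e :: PySem.List.slice r (some 0) (some c)], c + 1)
        = ([e :: PySem.List.slice r (some 0) (some c)]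
            ++ (cs'.foldl (pvSStep r) ([], c + 1)).1, (cs'.foldl (pvSStep r) ([], c + 1)).2) := by
      have := pvSAcc r cs' [e :: PySem.List.slice r (some 0) (some c)] [] (c + 1)
      simpa using this
    have hacc2 : cs'.foldl (pvSStep r) ([PySem.List.slice r (some 0) (some c)], c + 1)
        = ([PySem.List.slice r (some 0) (some c)]
            ++ (cs'.foldl (pvSStep r) ([], c + 1)).1, (cs'.foldl (pvSStep r) ([], c + 1)).2) := by
      have := pvSAcc r cs' [PySem.List.slice r (some 0) (some c)] [] (c + 1)
      simpa using this
    simp only [hacc1, hacc2]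
    have hp2 : 0 ≤ (cs'.foldl (pvSStep r) ([], c + 1)).2 :=
      pvSSnd r cs' [] (c + 1) (by omega) hcs'
    have hlen : ((e :: r).length : Int) = (r.length : Int) + 1 := by simp
    rw [hlen]
    by_cases hcond : (cs'.foldl (pvSStep r) ([], c + 1)).2 < (r.length : Int)
    · rw [if_pos (by omega), if_pos hcond, pvSliceFromShift e r _ hp2]
      simp [pvConsFirst]
    · rw [if_neg (by omega), if_neg hcond]
      simp [pvConsFirst]

-- stage 3 recursion: a cut at the head
theorem pvSFinCut (e : String) (r : List String) (cs : List Int) (h : ∀ c ∈ cs, 0 ≤ c) :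
    pvSFin (e :: r) ((0 : Int) :: cs.map (· + 1)) = [] :: pvSFin r cs := by
  unfold pvSFin
  simp only [List.foldl_cons, pvSStep, List.nil_append]
  have h00 : PySem.List.slice (e :: r) (some 0) (some 0) = ([] : List String) := by
    rw [PySem.List.slice_toNat _ le_rfl le_rfl]; simp
  rw [h00, show (0 : Int) + 1 = 0 + 1 from rfl, pvSShift e r cs _ 0 le_rfl h]
  have hacc : cs.foldl (pvSStep r) ([([] : List String)], 0)
      = ([([] : List String)] ++ (cs.foldl (pvSStep r) ([], 0)).1, (cs.foldl (pvSStep r) ([], 0)).2) := by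
    have := pvSAcc r cs [([] : List String)] [] 0
    simpa using this
  simp only [hacc]
  have hp2 : 0 ≤ (cs.foldl (pvSStep r) ([], 0)).2 := pvSSnd r cs [] 0 le_rfl h
  have hlen : ((e :: r).length : Int) = (r.length : Int) + 1 := by simp
  rw [hlen]
  by_cases hcond : (cs.foldl (pvSStep r) ([], 0)).2 < (r.length : Int)
  · rw [if_pos (by omega), if_pos hcond, pvSliceFromShift e r _ hp2]
    simp
  · rw [if_neg (by omega), if_neg hcond]
    simp

theorem pvConsFirst_nil (L : List (List String)) : pvConsFirst [] L = L := by
  cases L <;> simp [pvConsFirst]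

theorem pvConsFirst_comp (cur pre : List String) (L : List (List String)) :
    pvConsFirst cur (pvConsFirst pre L) = pvConsFirst (cur ++ pre) L := by
  cases L with
  | nil =>
    by_cases hp : pre.length > 0
    · have hq : (cur ++ pre).length > 0 := by simp; omega
      simp only [pvConsFirst]
      rw [if_pos hp, if_pos hq]
    · have : pre = [] := by simpa using hp
      subst this; simp [pvConsFirst]
  | cons p ps => simp [pvConsFirst]

-- B's three stages equal the reference recursion
theorem pvStagedEq (sep : String) (sts ens : List String) :
    ∀ (l : List String) (d : Int) (cur : List String),
      pvConsFirst cur (pvSFin l (pvCuts sep sts ens d l)) = pvH sep sts ens cur d l := by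
  intro l
  induction l with
  | nil =>
    intro d cur
    simp [pvCuts, pvSFin, pvH, pvConsFirst]
  | cons e r ih =>
    intro d cur
    have hnn := pvCutsNonneg sep sts ens r (pvUpd sts ens d e)
    by_cases hcut : e = sep ∧ pvUpd sts ens d e ≤ 0
    · obtain ⟨rfl, hd2⟩ := hcut
      have hcl : pvCuts e sts ens d (e :: r)
          = (0 : Int) :: (pvCuts e sts ens (pvUpd sts ens d e) r).map (· + 1) := by
        show (if e = e ∧ pvUpd sts ens d e ≤ 0 then [(0 : Int)] else [])
            ++ (pvCuts e sts ens (pvUpd sts ens d e) r).map (· + 1) = _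
        rw [if_pos (And.intro rfl hd2)]
        simp
      rw [hcl, pvSFinCut e r _ hnn]
      have hH : pvH e sts ens cur d (e :: r) = cur :: pvH e sts ens [] (pvUpd sts ens d e) r := by
        have hno : ¬ (pvUpd sts ens d e > 0 ∨ e ≠ e) := by
          simp
          omega
        simp only [pvH]
        rw [if_neg hno]
      rw [hH, ← ih (pvUpd sts ens d e) [], pvConsFirst_nil]
      simp [pvConsFirst]
    · have hcl : pvCuts sep sts ens d (e :: r)
          = (pvCuts sep sts ens (pvUpd sts ens d e) r).map (· + 1) := by
        show (if e = sep ∧ pvUpd sts ens d e ≤ 0 then [(0 : Int)] else [])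
            ++ (pvCuts sep sts ens (pvUpd sts ens d e) r).map (· + 1) = _
        rw [if_neg hcut]
        simp
      rw [hcl, pvSFinShift e r _ hnn, pvConsFirst_comp]
      have hH : pvH sep sts ens cur d (e :: r) = pvH sep sts ens (cur ++ [e]) (pvUpd sts ens d e) r := by
        have hor : pvUpd sts ens d e > 0 ∨ e ≠ sep := by
          rcases not_and_or.1 hcut with hx | hx
          · right; exact hx
          · left; omega
        simp only [pvH]
        rw [if_pos hor]
      rw [hH, ← ih (pvUpd sts ens d e) (cur ++ [e])]

-- B's port, written through the named stage helpers (definitional)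
theorem pvAltRfl (lst : List String) (sep : String) (sts ens : List String) :
    split_context_into_sublist_alt lst sep sts ens
      = pvSFin lst (((PySem.List.enumerate lst 0).filter
          (fun p => p.2 == sep && decide (PySem.List.pyGetD
            ((lst.foldl (pvDStep (PySem.Set.ofList sts) (PySem.Set.ofList ens)) ([], 0)).1) p.1 0 ≤ 0))).map (·.1)) := rfl

theorem pvAltChar (lst : List String) (sep : String) (sts ens : List String) :
    split_context_into_sublist_alt lst sep sts ens = pvH sep sts ens [] 0 lst := by
  rw [pvAltRfl]
  have hd : (lst.foldl (pvDStep (PySem.Set.ofList sts) (PySem.Set.ofList ens)) ([], 0)).1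
      = pvDepths sts ens 0 lst := by
    simpa using pvDFold sts ens lst [] 0
  simp only [hd]
  rw [pvCutsEq sep sts ens lst 0, ← pvStagedEq sep sts ens lst 0 [], pvConsFirst_nil]

-- ===== VERDICT (by name: the statement is the Claim_ definition above) =====
theorem split_context_into_sublist_spec : Claim_equal_split_context_into_sublist := by
  intro lst separator start_tokens end_tokens _ hpre
  unfold Spec_split_context_into_sublist split_context_into_sublist
  have hop : (PySem.List.pyRange 0 (start_tokens.length : Int) 1).foldl (fun a _ => a ++ [(0 : Int)]) []
      = List.replicate start_tokens.length 0 := by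
    rw [pvFoldAppendZero]
    simp [PySem.List.length_pyRange_one]
  rw [hop]
  obtain ⟨h1, h2⟩ := pvFoldAgree separator start_tokens end_tokens lst hpre [] []
    (List.replicate start_tokens.length 0) 0 (by simp) (by simp)
  simp only [h1, h2]
  rw [pvAltChar lst separator start_tokens end_tokens]
  have hsp := pvSPtoH separator start_tokens end_tokens lst [] [] 0
  rw [List.nil_append] at hsp
  exact hsp

@[simp] theorem split_context_into_sublist_raises : Claim_raises_split_context_into_sublist := by
  unfold Claim_raises_split_context_into_sublist
  constructor
  · rintro lst sep st en _ ⟨e, hmem, hns, hne, hge⟩ hpre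
    exact absurd (hpre e hmem hns hne) (by omega)
  · decide
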